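-- pv_equiv track=rewrite | github.com/cs-darshan/AIR | main.py | wiki_finder
-- ===== SOURCE A (Python) =====
-- def wiki_finder(text):
--     extras = ["wikipedia", "who", "is", "search", "on", "at", " "]
--     original_text = text.split()
--     to_be_searched = ""
--     for imp in range(0, len(original_text)):
--         if original_text[imp] != ".":
--             if original_text[imp] not in extras:
--                 to_be_searched = to_be_searched + original_text[imp]
--                 to_be_searched = to_be_searched + " "
--         else:
--             break
--     return to_be_searched
-- ===== SOURCE B (Python) =====
-- def wiki_finder(text):
--     extras = ["wikipedia", "who", "is", "search", "on", "at", " "]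
--     out = ""
--     for w in reversed(text.split()):
--         if w == ".":
--             out = ""
--         elif w not in extras:
--             out = w + " " + out
--     return out
-- ===== Notes on version B (the rewrite author's own statement) =====
-- stated objective: alternative
-- what changed: B replaces A's forward index loop, which searches for the period word and breaks there while appending to a string accumulator, by a single reverse pass that prepends each kept word and simply resets the accumulator whenever a period word is seen, so no cutoff/break logic exists at all.
import Mathlib
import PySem

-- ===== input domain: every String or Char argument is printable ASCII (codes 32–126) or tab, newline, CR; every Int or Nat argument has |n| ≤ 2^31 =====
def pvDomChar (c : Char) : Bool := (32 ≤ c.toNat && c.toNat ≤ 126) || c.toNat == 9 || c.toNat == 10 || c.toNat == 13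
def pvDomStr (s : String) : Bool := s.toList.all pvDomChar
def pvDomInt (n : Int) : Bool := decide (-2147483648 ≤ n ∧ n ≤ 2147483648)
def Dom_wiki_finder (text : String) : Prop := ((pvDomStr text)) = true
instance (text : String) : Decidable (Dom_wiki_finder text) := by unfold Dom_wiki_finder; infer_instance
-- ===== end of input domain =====

-- B: one reverse pass that prepends kept words and resets the accumulator on ".",
-- instead of A's forward loop that searches/breaks at "." and appends ('alternative').

-- ===== PORT A =====
def wikiExtras : List String := ["wikipedia", "who", "is", "search", "on", "at", " "]

-- A's forward index loop with break, as structural recursion carrying the accumulator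
def wikiLoopA : List String → String → String
  | [], acc => acc
  | w :: rest, acc =>
    if w ≠ "." then
      if w ∉ wikiExtras then wikiLoopA rest (acc ++ w ++ " ")
      else wikiLoopA rest acc
    else acc

def wiki_finder (text : String) : String :=
  wikiLoopA (PySem.Str.split₀ text) ""

-- ===== PORT B =====
-- B's reverse iteration: the word before the already-built suffix is prepended,
-- and "." resets the result built so far (head recursion = reversed loop order)
def wikiLoopB : List String → String
  | [] => ""
  | w :: rest =>
    let out := wikiLoopB rest
    if w = "." then ""
    else if w ∈ wikiExtras then out
    else w ++ " " ++ out

def wiki_finder_alt (text : String) : String :=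
  wikiLoopB (PySem.Str.split₀ text)

-- ===== PRECONDITION & SPEC =====
def Spec_wiki_finder (text : String) (out : String) : Prop := out = wiki_finder_alt text
instance (text : String) (out : String) : Decidable (Spec_wiki_finder text out) := by unfold Spec_wiki_finder; infer_instance

-- ===== CLAIM (what is proved, stated in full; the proofs are below) =====
def Claim_equal_wiki_finder : Prop := ∀ (text : String), Dom_wiki_finder text → Spec_wiki_finder text (wiki_finder text)

-- ===== LEMMAS AND PROOFS =====

theorem wikiLoopA_eq (ws : List String) : ∀ acc, wikiLoopA ws acc = acc ++ wikiLoopB ws := by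
  induction ws with
  | nil => intro acc; simp [wikiLoopA, wikiLoopB]
  | cons w rest ih =>
    intro acc
    by_cases hdot : w = "."
    · simp [wikiLoopA, wikiLoopB, hdot]
    · by_cases hex : w ∈ wikiExtras
      · simp [wikiLoopA, wikiLoopB, hdot, hex, ih]
      · simp [wikiLoopA, wikiLoopB, hdot, hex, ih, String.append_assoc]


-- ===== VERDICT (by name: the statement is the Claim_ definition above) =====
theorem wiki_finder_spec : Claim_equal_wiki_finder := by
  intro text _
  unfold Spec_wiki_finder wiki_finder wiki_finder_alt
  rw [wikiLoopA_eq]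
  simp
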